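-- pv_equiv track=rewrite | github.com/liweitj47/BERT_unsupervised_word_segmentation | text2label.py | label2text_ids
-- ===== SOURCE A (Python) =====
-- def label2text_ids(text_ids, labels):
--     '''
--     Input: a list of token ids and a list of labels,
--     Return: a list of words.
--
--     e.g. text_ids=[x1, x2, x3, x4, x5, x6], labels=[0, 0, 1, 0, 0, 1]
--          --> [[x1], [x2, x3], [x4], [x5, x6]]
--     '''
--     assert len(text_ids) == len(labels)
--     word_ids = []
--     p = 0
--     for i in range(len(labels)):
--         if labels[i] == 0: # label 'B'
--             word_ids.append(text_ids[p:i])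
--             p = i
--         if i == len(labels) - 1:
--             word_ids.append(text_ids[p:])
--     return word_ids[1:]
-- ===== SOURCE B (Python) =====
-- def label2text_ids(text_ids, labels):
--     assert len(text_ids) == len(labels)
--     boundaries = [i for i, l in enumerate(labels) if l == 0]
--     words = []
--     for k in range(len(boundaries)):
--         start = boundaries[k]
--         end = boundaries[k + 1] if k + 1 < len(boundaries) else len(text_ids)
--         words.append(text_ids[start:end])
--     return words
-- ===== Notes on version B (the rewrite author's own statement) =====
-- stated objective: alternative
-- what changed: B first collects all boundary indices (where label == 0) in one pass, then slices text_ids between consecutive boundaries (last slice running to the end), replacing A's running-pointer scan with its in-loop last-index special case.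
import Mathlib
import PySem

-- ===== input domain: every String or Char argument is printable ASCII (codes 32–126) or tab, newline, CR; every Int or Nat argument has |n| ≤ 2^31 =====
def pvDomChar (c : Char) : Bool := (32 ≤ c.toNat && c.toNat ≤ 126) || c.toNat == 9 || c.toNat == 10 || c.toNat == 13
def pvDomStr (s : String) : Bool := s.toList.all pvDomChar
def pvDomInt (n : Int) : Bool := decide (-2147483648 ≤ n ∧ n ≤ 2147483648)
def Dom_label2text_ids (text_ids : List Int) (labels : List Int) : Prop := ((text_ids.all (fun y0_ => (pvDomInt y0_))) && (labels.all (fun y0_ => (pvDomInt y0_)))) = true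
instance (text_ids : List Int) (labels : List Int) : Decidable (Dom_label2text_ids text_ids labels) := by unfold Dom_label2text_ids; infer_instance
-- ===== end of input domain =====

-- B collects the boundary indices first and then slices between consecutive boundaries;
-- equivalence is over the return value only (neither program mutates its arguments).

-- ===== PORT A =====
def label2text_ids (text_ids : List Int) (labels : List Int) : List (List Int) :=
  -- 'assert len(text_ids) == len(labels)' is excluded by Pre_label2text_ids
  let n : Int := PySem.List.len labels
  let st : List (List Int) × Int :=
    (PySem.List.pyRange 0 n 1).foldl
      (fun s i =>
        let s := if PySem.List.pyGet? labels i = some 0 then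
            (s.1 ++ [PySem.List.slice text_ids (some s.2) (some i)], i)
          else s
        if i = n - 1 then (s.1 ++ [PySem.List.slice text_ids (some s.2) none], s.2)
        else s)
      ([], 0)
  PySem.List.slice st.1 (some 1) none

-- ===== PORT B =====
def label2text_ids_alt (text_ids : List Int) (labels : List Int) : List (List Int) :=
  -- 'assert len(text_ids) == len(labels)' is excluded by Pre_label2text_ids
  let boundaries : List Int :=
    ((PySem.List.enumerate labels 0).filter (fun p => p.2 == 0)).map (·.1)
  let m : Int := PySem.List.len boundaries
  (PySem.List.pyRange 0 m 1).foldl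
    (fun words k =>
      let s := PySem.List.pyGetD boundaries k 0
      let e := if k + 1 < m then PySem.List.pyGetD boundaries (k + 1) 0
               else PySem.List.len text_ids
      words ++ [PySem.List.slice text_ids (some s) (some e)])
    []

-- ===== PRECONDITION & SPEC =====
-- Pre_ excludes exactly the inputs on which A's assert raises (unequal lengths).
def Pre_label2text_ids (text_ids : List Int) (labels : List Int) : Prop :=
  text_ids.length = labels.length
instance (text_ids : List Int) (labels : List Int) : Decidable (Pre_label2text_ids text_ids labels) := by unfold Pre_label2text_ids; infer_instance

def pvWitness_label2text_ids : List Int × List Int := ([5, 6, 7, 8], [0, 1, 0, 1])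

def Spec_label2text_ids (text_ids : List Int) (labels : List Int) (out : List (List Int)) : Prop := out = label2text_ids_alt text_ids labels
instance (text_ids : List Int) (labels : List Int) (out : List (List Int)) : Decidable (Spec_label2text_ids text_ids labels out) := by unfold Spec_label2text_ids; infer_instance

-- ===== CLAIM (what is proved, stated in full; the proofs are below) =====
def Claim_equal_label2text_ids : Prop := ∀ (text_ids : List Int) (labels : List Int), Dom_label2text_ids text_ids labels → Pre_label2text_ids text_ids labels → Spec_label2text_ids text_ids labels (label2text_ids text_ids labels)

-- ===== LEMMAS AND PROOFS =====

-- the segments of t cut at p, b0, b1, …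
def segs (t : List Int) (p : Int) : List Int → List (List Int)
  | [] => []
  | b :: bs => PySem.List.slice t (some p) (some b) :: segs t b bs

-- the last element of bs, or p if bs is empty (A's final pointer)
def lastD : List Int → Int → Int
  | [], p => p
  | b :: bs, _ => lastD bs b

-- segments between consecutive boundaries, the last one running to N
def segsN (t : List Int) (N : Int) : List Int → List (List Int)
  | [] => []
  | b :: rest => segs t b (rest ++ [N])

-- the boundary-index list B builds
def bnd (labels : List Int) : List Int :=
  ((PySem.List.enumerate labels 0).filter (fun p => p.2 == 0)).map (·.1)

theorem lastD_concat (bs : List Int) (x p : Int) : lastD (bs ++ [x]) p = x := by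
  induction bs generalizing p with
  | nil => rfl
  | cons b bs ih => simpa [lastD] using ih b

theorem lastD_nonneg (bs : List Int) (p : Int) (hp : 0 ≤ p) (hbs : ∀ b ∈ bs, 0 ≤ b) :
    0 ≤ lastD bs p := by
  induction bs generalizing p with
  | nil => exact hp
  | cons b bs ih =>
    exact ih b (hbs b (by simp)) (fun c hc => hbs c (by simp [hc]))

theorem segs_append (t : List Int) (bs : List Int) (p x : Int) :
    segs t p (bs ++ [x]) = segs t p bs ++ [PySem.List.slice t (some (lastD bs p)) (some x)] := by
  induction bs generalizing p with
  | nil => simp [segs, lastD]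
  | cons b bs ih => simp only [List.cons_append, segs, lastD, ih b]

theorem bnd_append (ls : List Int) (y : Int) :
    bnd (ls ++ [y]) = bnd ls ++ (if y = 0 then [(ls.length : Int)] else []) := by
  unfold bnd
  rw [PySem.List.enumerate_append]
  simp [PySem.List.enumerate]
  split_ifs with h <;> simp [h]

theorem bnd_nonneg (labels : List Int) : ∀ b ∈ bnd labels, 0 ≤ b := by
  intro b hb
  unfold bnd at hb
  simp only [List.mem_map, List.mem_filter] at hb
  obtain ⟨p, ⟨hp, _⟩, rfl⟩ := hb
  rw [PySem.List.mem_enumerate_iff] at hp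
  obtain ⟨k, hk, rfl⟩ := hp
  simp

theorem slice_none_eq (xs : List Int) (a : Int) (ha : 0 ≤ a) :
    PySem.List.slice xs (some a) none = PySem.List.slice xs (some a) (some (xs.length : Int)) := by
  obtain ⟨k, rfl⟩ : ∃ k : Nat, a = (k : Int) := ⟨a.toNat, (Int.toNat_of_nonneg ha).symm⟩
  rw [PySem.List.slice_from_natCast, PySem.List.slice_natCast]
  rw [List.take_of_length_le (by simp)]

-- A's loop body without the last-index special case
def stepP (t labels : List Int) (s : List (List Int) × Int) (i : Int) : List (List Int) × Int :=
  if PySem.List.pyGet? labels i = some 0 then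
    (s.1 ++ [PySem.List.slice t (some s.2) (some i)], i)
  else s

theorem plain_prefix (t : List Int) (ls : List Int) : ∀ (rest : List Int),
    (PySem.List.pyRange 0 (ls.length : Int) 1).foldl (stepP t (ls ++ rest)) ([], 0)
      = (segs t 0 (bnd ls), lastD (bnd ls) 0) := by
  induction ls using List.reverseRecOn with
  | nil => intro rest; simp [PySem.List.pyRange_one_eq_nil, bnd, PySem.List.enumerate, segs, lastD]
  | append_singleton ls y ih =>
    intro rest
    have hlen : ((ls ++ [y]).length : Int) = (ls.length : Int) + 1 := by simp
    rw [hlen, PySem.List.pyRange_one_succ_right (by positivity), List.foldl_append,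
        List.append_assoc, List.singleton_append, ih (y :: rest)]
    have hget : PySem.List.pyGet? (ls ++ y :: rest) (ls.length : Int) = some y :=
      PySem.List.pyGet?_append_length ls rest y
    simp only [List.foldl_cons, List.foldl_nil, stepP, hget, Option.some.injEq]
    rw [bnd_append]
    by_cases h : y = 0
    · simp [h, segs_append, lastD_concat]
    · simp [h]

theorem A_closed (t labels : List Int) (h : labels ≠ []) :
    label2text_ids t labels
      = (segs t 0 (bnd labels)
          ++ [PySem.List.slice t (some (lastD (bnd labels) 0)) none]).tail := by
  obtain ⟨ls, y, hly⟩ := (List.eq_nil_or_concat labels).resolve_left h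
  rw [List.concat_eq_append] at hly
  subst hly
  unfold label2text_ids
  simp only [PySem.List.len_eq]
  have hlen : (((ls ++ [y]).length : Nat) : Int) = (ls.length : Int) + 1 := by simp
  simp only [hlen]
  rw [PySem.List.pyRange_one_succ_right (by positivity), List.foldl_append]
  have hcongr :
      (PySem.List.pyRange 0 (ls.length : Int) 1).foldl
        (fun (s : List (List Int) × Int) i =>
          let s := if PySem.List.pyGet? (ls ++ [y]) i = some 0 then
              (s.1 ++ [PySem.List.slice t (some s.2) (some i)], i)
            else s
          if i = (ls.length : Int) + 1 - 1 then
            (s.1 ++ [PySem.List.slice t (some s.2) none], s.2)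
          else s) ([], 0)
      = (PySem.List.pyRange 0 (ls.length : Int) 1).foldl (stepP t (ls ++ [y])) ([], 0) := by
    apply PySem.List.foldl_congr_mem
    intro acc i hi
    rw [PySem.List.mem_pyRange_one] at hi
    have : ¬ (i = (ls.length : Int) + 1 - 1) := by omega
    simp only [stepP, this, if_false]
  rw [hcongr, plain_prefix t ls [y]]
  have hget : PySem.List.pyGet? (ls ++ [y]) (ls.length : Int) = some y :=
    PySem.List.pyGet?_append_length ls [] y
  simp only [List.foldl_cons, List.foldl_nil, hget, Option.some.injEq, add_sub_cancel_right]
  rw [bnd_append]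
  by_cases h0 : y = 0
  · simp [h0, PySem.List.slice_from_one, segs_append, lastD_concat]
  · simp [h0, PySem.List.slice_from_one]

theorem B_fold (t : List Int) (bs : List Int) : ∀ (N : Int),
    (PySem.List.pyRange 0 (bs.length : Int) 1).foldl
      (fun words k =>
        let s := PySem.List.pyGetD bs k 0
        let e := if k + 1 < (bs.length : Int) then PySem.List.pyGetD bs (k + 1) 0 else N
        words ++ [PySem.List.slice t (some s) (some e)]) []
      = segsN t N bs := by
  induction bs using List.reverseRecOn with
  | nil => intro N; simp [PySem.List.pyRange_one_eq_nil, segsN]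
  | append_singleton cs c ih =>
    intro N
    have hlen : (((cs ++ [c]).length : Nat) : Int) = (cs.length : Int) + 1 := by simp
    simp only [hlen]
    rw [PySem.List.pyRange_one_succ_right (by positivity), List.foldl_append]
    have hcongr :
        (PySem.List.pyRange 0 (cs.length : Int) 1).foldl
          (fun (words : List (List Int)) k =>
            let s := PySem.List.pyGetD (cs ++ [c]) k 0
            let e := if k + 1 < (cs.length : Int) + 1 then PySem.List.pyGetD (cs ++ [c]) (k + 1) 0 else N
            words ++ [PySem.List.slice t (some s) (some e)]) []
        = (PySem.List.pyRange 0 (cs.length : Int) 1).foldl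
          (fun (words : List (List Int)) k =>
            let s := PySem.List.pyGetD cs k 0
            let e := if k + 1 < (cs.length : Int) then PySem.List.pyGetD cs (k + 1) 0 else c
            words ++ [PySem.List.slice t (some s) (some e)]) [] := by
      apply PySem.List.foldl_congr_mem
      intro acc k hk
      rw [PySem.List.mem_pyRange_one] at hk
      obtain ⟨m, rfl⟩ : ∃ m : Nat, k = (m : Int) := ⟨k.toNat, (Int.toNat_of_nonneg hk.1).symm⟩
      have hm : m < cs.length := by exact_mod_cast hk.2
      have hs : PySem.List.pyGetD (cs ++ [c]) (m : Int) 0 = PySem.List.pyGetD cs (m : Int) 0 := by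
        simp [List.getElem?_append_left hm]
      have h1 : ((m : Int) + 1 < (cs.length : Int) + 1) := by omega
      simp only [hs, if_pos h1]
      by_cases h2 : (m : Int) + 1 < (cs.length : Int)
      · have hm1 : m + 1 < cs.length := by exact_mod_cast h2
        have he : PySem.List.pyGetD (cs ++ [c]) ((m : Int) + 1) 0 = PySem.List.pyGetD cs ((m : Int) + 1) 0 := by
          have hc : ((m : Int) + 1) = ((m + 1 : Nat) : Int) := by push_cast; ring
          rw [hc, PySem.List.pyGetD_natCast, PySem.List.pyGetD_natCast]
          simp [List.getD, List.getElem?_append_left hm1]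
        simp [he, h2]
      · have hm1 : m + 1 = cs.length := by omega
        have he : PySem.List.pyGetD (cs ++ [c]) ((m : Int) + 1) 0 = c := by
          have hc : ((m : Int) + 1) = ((cs.length : Nat) : Int) := by omega
          rw [hc]
          simp
        simp [he, h2]
    rw [hcongr, ih c]
    have hgetc : PySem.List.pyGetD (cs ++ [c]) ((cs.length : Nat) : Int) 0 = c := by
      simp
    have hnotlt : ¬ ((cs.length : Int) + 1 < (cs.length : Int) + 1) := by omega
    simp only [List.foldl_cons, List.foldl_nil, hgetc, hnotlt, if_false]
    cases cs with
    | nil => simp [segsN, segs]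
    | cons b rest =>
      show segs t b (rest ++ [c]) ++ [PySem.List.slice t (some c) (some N)]
            = segsN t N (b :: rest ++ [c])
      rw [List.cons_append, segsN, segs_append t (rest ++ [c]) b N, lastD_concat,
          segs_append t rest b c]

theorem B_closed (t labels : List Int) :
    label2text_ids_alt t labels = segsN t (t.length : Int) (bnd labels) := by
  unfold label2text_ids_alt
  simp only [PySem.List.len_eq]
  exact B_fold t (bnd labels) (t.length : Int)

theorem bridge (t : List Int) (bs : List Int) (hbs : ∀ b ∈ bs, 0 ≤ b) :
    (segs t 0 bs ++ [PySem.List.slice t (some (lastD bs 0)) none]).tail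
      = segsN t (t.length : Int) bs := by
  cases bs with
  | nil => simp [segs, segsN]
  | cons b rest =>
    have hb : 0 ≤ lastD rest b :=
      lastD_nonneg rest b (hbs b (by simp)) (fun c hc => hbs c (by simp [hc]))
    simp only [segs, lastD, segsN, List.cons_append, List.tail_cons]
    rw [segs_append, slice_none_eq t (lastD rest b) hb]

-- ===== VERDICT (by name: the statement is the Claim_ definition above) =====
theorem label2text_ids_spec : Claim_equal_label2text_ids := by
  intro t labels _ hpre
  unfold Spec_label2text_ids
  rcases List.eq_nil_or_concat labels with hnil | ⟨ls, y, hly⟩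
  · subst hnil
    have ht : t = [] := List.eq_nil_of_length_eq_zero hpre
    subst ht; decide
  · have h : labels ≠ [] := by subst hly; simp
    rw [A_closed t labels h, B_closed, bridge t _ (bnd_nonneg _)]
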